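-- pv_equiv track=rewrite | github.com/jk-jung/problem-solving | codewars/6kyu/6_Word a10n (abbreviation).py | abbreviate
-- ===== SOURCE A (Python) =====
-- def abbreviate(s):
--     def f(x):
--         return x if len(x) < 4 else f'{x[0]}{len(x) - 2}{x[-1]}'
--     r, c = '', ''
--     for x in s:
--         if x.isalpha():
--             c += x
--         else:
--             r += f(c)
--             c = ''
--             r += x
--
--     return r + f(c)
-- ===== SOURCE B (Python) =====
-- def abbreviate(s):
--     n = len(s)
--     out = []
--     i = 0
--     while i < n:
--         if s[i].isalpha():
--             j = i
--             while j < n and s[j].isalpha():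
--                 j += 1
--             w = s[i:j]
--             out.append(w if j - i < 4 else w[0] + str(j - i - 2) + w[-1])
--             i = j
--         else:
--             out.append(s[i])
--             i += 1
--     return ''.join(out)
-- ===== Notes on version B (the rewrite author's own statement) =====
-- stated objective: alternative
-- what changed: Replaces the char-by-char loop with r/c string accumulators by a two-pointer scan that finds each maximal alphabetic run at once, abbreviates the run, and joins the collected pieces.
import Mathlib
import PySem

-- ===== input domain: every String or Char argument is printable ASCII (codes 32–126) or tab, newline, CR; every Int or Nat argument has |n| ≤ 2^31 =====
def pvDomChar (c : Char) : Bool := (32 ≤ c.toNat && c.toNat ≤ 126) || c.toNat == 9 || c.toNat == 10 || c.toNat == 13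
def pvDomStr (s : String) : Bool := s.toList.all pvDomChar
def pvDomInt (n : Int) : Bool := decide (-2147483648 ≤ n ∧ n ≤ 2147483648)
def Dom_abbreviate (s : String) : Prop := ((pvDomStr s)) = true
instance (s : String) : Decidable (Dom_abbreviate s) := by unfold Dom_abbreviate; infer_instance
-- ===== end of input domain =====

-- B is an alternative run-based scan (two pointers over maximal alphabetic runs, joined pieces)
-- instead of A's char-by-char loop with r/c string accumulators; same values, similar cost.

-- ===== PORT A =====
-- inner helper f(x): x if len(x) < 4 else f'{x[0]}{len(x)-2}{x[-1]}'
def abbrF (x : List Char) : List Char :=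
  if x.length < 4 then x
  else ((PySem.List.pyGet? x 0).getD ' ') ::
       (PySem.Int.toChars ((x.length : Int) - 2) ++ [((PySem.List.pyGet? x (-1)).getD ' ')])

-- the 'for x in s' loop over state (r, c)
def abbrLoop : List Char → List Char → List Char → List Char
  | [], r, c => r ++ abbrF c
  | x :: t, r, c =>
    if PySem.Chars.isalpha x then abbrLoop t r (c ++ [x])
    else abbrLoop t (r ++ abbrF c ++ [x]) []

def abbreviate (s : String) : String :=
  String.ofList (abbrLoop s.toList [] [])

-- ===== PORT B =====
-- B's abbreviation of one run w (w if short else w[0] + str(len-2) + w[-1])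
def abbrW (w : List Char) : List Char :=
  if w.length < 4 then w
  else w.headD ' ' :: (PySem.Int.toChars ((w.length : Int) - 2) ++ [w.getLastD ' '])

-- B's outer while loop: at an alphabetic char, advance j over the whole run (takeWhile/dropWhile),
-- emit the abbreviated run; otherwise emit the char.
def abbrScan : List Char → List Char
  | [] => []
  | x :: t =>
    if PySem.Chars.isalpha x then
      abbrW (x :: t.takeWhile (fun d => PySem.Chars.isalpha d)) ++
        abbrScan (t.dropWhile (fun d => PySem.Chars.isalpha d))
    else x :: abbrScan t
  termination_by l => l.length
  decreasing_by
  · simpa using Nat.lt_succ_of_le (t.length_dropWhile_le _)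
  · simp

def abbreviate_alt (s : String) : String :=
  String.ofList (abbrScan s.toList)

-- ===== PRECONDITION & SPEC =====
def Spec_abbreviate (s : String) (out : String) : Prop := out = abbreviate_alt s
instance (s : String) (out : String) : Decidable (Spec_abbreviate s out) := by unfold Spec_abbreviate; infer_instance

-- ===== CLAIM (what is proved, stated in full; the proofs are below) =====
def Claim_equal_abbreviate : Prop := ∀ (s : String), Dom_abbreviate s → Spec_abbreviate s (abbreviate s)

-- ===== LEMMAS AND PROOFS =====

lemma abbrF_eq_abbrW (x : List Char) : abbrF x = abbrW x := by
  unfold abbrF abbrW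
  split
  · rfl
  · rename_i h
    simp [PySem.List.pyGet?, PySem.List.pyIdx?, List.getLastD_eq_getLast?,
      List.head?_eq_getElem?, List.getLast?_eq_getElem?]
    rw [if_pos (by omega), if_pos (by omega)]
    simp

lemma abbrScan_eq_take_drop (l : List Char) :
    abbrScan l = abbrW (l.takeWhile (fun d => PySem.Chars.isalpha d)) ++
      abbrScan (l.dropWhile (fun d => PySem.Chars.isalpha d)) := by
  cases l with
  | nil => simp [abbrScan, abbrW]
  | cons x t =>
    by_cases hx : PySem.Chars.isalpha x
    · rw [List.takeWhile_cons_of_pos (by simpa using hx),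
        List.dropWhile_cons_of_pos (by simpa using hx)]
      rw [abbrScan]
      simp [hx]
    · rw [List.takeWhile_cons_of_neg (by simpa using hx),
        List.dropWhile_cons_of_neg (by simpa using hx)]
      simp [abbrW]

lemma abbrLoop_eq (l : List Char) : ∀ (r c : List Char),
    abbrLoop l r c = r ++ abbrW (c ++ l.takeWhile (fun d => PySem.Chars.isalpha d)) ++
      abbrScan (l.dropWhile (fun d => PySem.Chars.isalpha d)) := by
  induction l with
  | nil =>
    intro r c
    simp [abbrLoop, abbrF_eq_abbrW, abbrScan]
  | cons x t ih =>
    intro r c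
    by_cases hx : PySem.Chars.isalpha x
    · rw [List.takeWhile_cons_of_pos (by simpa using hx),
        List.dropWhile_cons_of_pos (by simpa using hx)]
      rw [abbrLoop]
      simp only [hx, if_true]
      rw [ih]
      simp
    · rw [List.takeWhile_cons_of_neg (by simpa using hx),
        List.dropWhile_cons_of_neg (by simpa using hx)]
      rw [abbrLoop, if_neg (by simp [hx]), ih, abbrF_eq_abbrW,
        abbrScan, if_neg (by simp [hx]), abbrScan_eq_take_drop t]
      simp [abbrW]

-- ===== VERDICT (by name: the statement is the Claim_ definition above) =====
theorem abbreviate_spec : Claim_equal_abbreviate := by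
  intro s _
  show abbreviate s = abbreviate_alt s
  unfold abbreviate abbreviate_alt
  rw [abbrLoop_eq, abbrScan_eq_take_drop s.toList]
  simp
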